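-- pv_equiv track=rewrite | github.com/ryankenney-dev/advent-of-code-2020 | day-24/part_1.py | get_tile_coords
-- ===== SOURCE A (Python) =====
-- def get_tile_coords(tile_path):
-- 	x = 0
-- 	y = 0
-- 	for direction in tile_path:
-- 		if direction == 'e':
-- 			x += 1
-- 		if direction == 'w':
-- 			x -= 1
-- 		elif direction == 'ne':
-- 			y += 1
-- 		elif direction == 'sw':
-- 			y -= 1
-- 		elif direction == 'nw':
-- 			y += 1
-- 			x -= 1
-- 		elif direction == 'se':
-- 			y -= 1
-- 			x += 1
-- 	return (x,y)
-- ===== SOURCE B (Python) =====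
-- def get_tile_coords(tile_path):
-- 	e = tile_path.count('e')
-- 	w = tile_path.count('w')
-- 	ne = tile_path.count('ne')
-- 	sw = tile_path.count('sw')
-- 	nw = tile_path.count('nw')
-- 	se = tile_path.count('se')
-- 	return (e - w - nw + se, ne - sw + nw - se)
-- ===== Notes on version B (the rewrite author's own statement) =====
-- stated objective: simpler
-- what changed: B replaces A's per-step accumulating loop over the path with six aggregate direction counts combined in a closed-form linear formula for (x, y).
import Mathlib
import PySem

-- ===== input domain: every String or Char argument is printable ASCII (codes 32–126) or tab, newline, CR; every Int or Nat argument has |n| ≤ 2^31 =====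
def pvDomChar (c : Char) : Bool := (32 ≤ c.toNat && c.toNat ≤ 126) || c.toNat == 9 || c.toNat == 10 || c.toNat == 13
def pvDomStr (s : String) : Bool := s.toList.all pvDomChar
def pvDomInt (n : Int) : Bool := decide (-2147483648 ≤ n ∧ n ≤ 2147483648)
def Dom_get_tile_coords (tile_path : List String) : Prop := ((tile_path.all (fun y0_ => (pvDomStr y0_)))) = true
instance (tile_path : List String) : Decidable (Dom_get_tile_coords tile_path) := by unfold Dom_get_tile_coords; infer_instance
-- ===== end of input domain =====

-- B replaces A's per-step accumulating loop with six aggregate direction counts combined in a closed-form linear formula (objective: simpler).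

-- ===== PORT A =====
-- one loop step of A: the standalone 'if e' then the 'if w / elif …' chain, in source order
def pvStepA (s : Int × Int) (direction : String) : Int × Int :=
  let x := s.1
  let y := s.2
  let x := if direction = "e" then x + 1 else x
  if direction = "w" then (x - 1, y)
  else if direction = "ne" then (x, y + 1)
  else if direction = "sw" then (x, y - 1)
  else if direction = "nw" then (x - 1, y + 1)
  else if direction = "se" then (x + 1, y - 1)
  else (x, y)

def get_tile_coords (tile_path : List String) : Int × Int :=
  tile_path.foldl pvStepA (0, 0)

-- ===== PORT B =====
def get_tile_coords_alt (tile_path : List String) : Int × Int :=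
  let e : Int := PySem.List.count tile_path "e"
  let w : Int := PySem.List.count tile_path "w"
  let ne : Int := PySem.List.count tile_path "ne"
  let sw : Int := PySem.List.count tile_path "sw"
  let nw : Int := PySem.List.count tile_path "nw"
  let se : Int := PySem.List.count tile_path "se"
  (e - w - nw + se, ne - sw + nw - se)

-- ===== PRECONDITION & SPEC =====
def Spec_get_tile_coords (tile_path : List String) (out : Int × Int) : Prop := out = get_tile_coords_alt tile_path
instance (tile_path : List String) (out : Int × Int) : Decidable (Spec_get_tile_coords tile_path out) := by unfold Spec_get_tile_coords; infer_instance

-- ===== CLAIM (what is proved, stated in full; the proofs are below) =====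
def Claim_equal_get_tile_coords : Prop := ∀ (tile_path : List String), Dom_get_tile_coords tile_path → Spec_get_tile_coords tile_path (get_tile_coords tile_path)

-- ===== LEMMAS AND PROOFS =====
theorem pv_foldl_counts (l : List String) (x y : Int) :
    l.foldl pvStepA (x, y) =
      (x + (l.count "e" : Int) - l.count "w" - l.count "nw" + l.count "se",
       y + (l.count "ne" : Int) - l.count "sw" + l.count "nw" - l.count "se") := by
  induction l generalizing x y with
  | nil => simp
  | cons d t ih =>
    simp only [List.foldl_cons, List.count_cons]
    rw [ih]
    by_cases h1 : d = "e" <;> by_cases h2 : d = "w" <;> by_cases h3 : d = "ne" <;>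
      by_cases h4 : d = "sw" <;> by_cases h5 : d = "nw" <;> by_cases h6 : d = "se" <;>
      simp_all [pvStepA] <;> push_cast <;> try ring <;> exact ⟨trivial, trivial⟩

-- ===== VERDICT (by name: the statement is the Claim_ definition above) =====
theorem get_tile_coords_spec : Claim_equal_get_tile_coords := by
  intro tp _
  unfold Spec_get_tile_coords get_tile_coords get_tile_coords_alt
  rw [pv_foldl_counts]
  simp [PySem.List.count_eq]
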